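-- pv_equiv track=rewrite | github.com/rohaquinlop/UVa-Solutions | Solved/p11111 - Generalized Matrioshkas.py | solve
-- ===== SOURCE A (Python) =====
-- def aux(nums, father, idx, n):
-- 	if idx == n:
-- 		return True
-- 	elif n-idx == 2:
-- 		return -1*nums[idx] < father
-- 	ans = True
-- 	internalSum = 0
-- 	openVal = -1
-- 	j = idx
--
-- 	for i in range(idx, n):
-- 		if nums[i] < 0 and openVal == -1:
-- 			openVal = -1*nums[i]
-- 			j = i
-- 		elif nums[i] == openVal:
-- 			ans = ans and aux(nums, openVal, j+1, i)
-- 			openVal = -1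
-- 			j = i
-- 			internalSum += nums[i]
--
-- 	return internalSum < father and ans and j != idx and openVal == -1
--
-- def solve(nums, father, idx, n):
-- 	ans = True
-- 	stack = []
--
-- 	for num in nums:
-- 		if num < 0:
-- 			stack.append(num)
-- 		else:
-- 			if stack:
-- 				if num == -1*stack[-1]:
-- 					stack.pop()
-- 				else:
-- 					ans = False
-- 			else:
-- 				ans = False
--
-- 	if stack:
-- 		ans = False
-- 	elif ans:
-- 		ans = aux(nums, father, idx, n)
--
-- 	return ans
-- ===== SOURCE B (Python) =====
-- def segment(win):
--     """Split a window into its toplevel (child-window, size) pairs plus the size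
--     total; None if some open doll is never closed."""
--     kids = []
--     total = 0
--     pos = 0
--     while True:
--         p = next((i for i in range(pos, len(win)) if win[i] < 0), None)
--         if p is None:
--             return kids, total
--         v = -win[p]
--         try:
--             q = win.index(v, p + 1)
--         except ValueError:
--             return None
--         kids.append((win[p + 1:q], v))
--         total += v
--         pos = q + 1
--
-- def solve(nums, father, idx, n):
--     # every close token must match the innermost open doll
--     opens = []
--     for t in nums:
--         if t < 0:
--             opens.append(-t)
--         elif opens and opens[-1] == t:
--             opens.pop()
--         else:
--             return False
--     if opens:
--         return False
--     # validate windows iteratively from an explicit worklist of (window, capacity)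
--     todo = [(nums[idx:n], father)]
--     while todo:
--         win, cap = todo.pop()
--         if not win:
--             continue
--         if len(win) == 2:
--             if not -win[0] < cap:
--                 return False
--             continue
--         s = segment(win)
--         if s is None:
--             return False
--         kids, total = s
--         if not 0 < total < cap:
--             return False
--         todo.extend(kids)
--     return True
-- ===== Notes on version B (the rewrite author's own statement) =====
-- stated objective: alternative
-- what changed: A validates with a recursive descent whose stateful index loop (openVal/j/internalSum) rescans the array after a full-array flag-carrying balance fold; B early-exits a single balance pass, slices the window out once, then repeatedly splits each window into (child-window, size) pairs via first-occurrence search (.index) and slicing, validating windows iteratively from an explicit worklist instead of recursion; …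
-- outside the precondition, e.g. on solve([-2, -1, 1, 2], 10, -1, 4): A returns True, B returns False; on solve([-1, 1], 5, 3, 1): A returns False, B returns True; on solve([-1, 1], 5, 0, 4): A raises IndexError, B returns True
import Mathlib
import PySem

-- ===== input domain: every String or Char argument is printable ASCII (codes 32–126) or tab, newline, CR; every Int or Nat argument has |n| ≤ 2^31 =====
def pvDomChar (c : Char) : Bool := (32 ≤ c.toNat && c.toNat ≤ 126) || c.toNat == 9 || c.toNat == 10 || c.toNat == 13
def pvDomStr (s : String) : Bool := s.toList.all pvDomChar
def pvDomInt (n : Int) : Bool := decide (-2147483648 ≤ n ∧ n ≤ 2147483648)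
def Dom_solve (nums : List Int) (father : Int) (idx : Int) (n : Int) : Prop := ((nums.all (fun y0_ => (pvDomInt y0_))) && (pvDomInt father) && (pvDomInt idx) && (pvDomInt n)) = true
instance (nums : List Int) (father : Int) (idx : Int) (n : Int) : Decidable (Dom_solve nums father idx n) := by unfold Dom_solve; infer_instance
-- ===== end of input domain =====

-- B replaces A's recursive descent (aux) by slicing the window out and validating
-- windows from an explicit worklist, splitting each window into (child, size) pairs
-- (objective: alternative decomposition of the same validation).

-- ===== PORT A =====
-- nums[i] of A: exact Python indexing (negative wrap) where it returns; the IndexError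
-- inputs are outside Pre_solve, there the getD default is never reached.
def pyGetZ (nums : List Int) (i : Int) : Int := (PySem.List.pyGet? nums i).getD 0

mutual
def auxA (nums : List Int) (father : Int) (idx : Int) (n : Int) : Bool :=
  if idx = n then true
  else if n - idx = 2 then decide (-1 * pyGetZ nums idx < father)
  else
    auxLoop nums father idx n (PySem.List.pyRange idx n 1)
      (fun x hx => PySem.List.mem_pyRange_one.mp hx) true 0 (-1) idx (le_refl idx)
termination_by ((n - idx).toNat, (n - idx).toNat + 1)
decreasing_by
  apply Prod.Lex.right
  simp [PySem.List.length_pyRange_one]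

def auxLoop (nums : List Int) (father : Int) (idx : Int) (n : Int) (is : List Int)
    (his : ∀ x ∈ is, idx ≤ x ∧ x < n) (ans : Bool) (internalSum : Int)
    (openVal : Int) (j : Int) (hj : idx ≤ j) : Bool :=
  match is with
  | [] => decide (internalSum < father) && ans && !(decide (j = idx)) && decide (openVal = -1)
  | i :: is' =>
    if pyGetZ nums i < 0 ∧ openVal = -1 then
      auxLoop nums father idx n is' (fun x hx => his x (List.mem_cons_of_mem _ hx))
        ans internalSum (-1 * pyGetZ nums i) i (his i List.mem_cons_self).1
    else if pyGetZ nums i = openVal then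
      auxLoop nums father idx n is' (fun x hx => his x (List.mem_cons_of_mem _ hx))
        (ans && auxA nums openVal (j + 1) i) (internalSum + pyGetZ nums i) (-1) i
        (his i List.mem_cons_self).1
    else
      auxLoop nums father idx n is' (fun x hx => his x (List.mem_cons_of_mem _ hx))
        ans internalSum openVal j hj
termination_by ((n - idx).toNat, is.length)
decreasing_by
  · apply Prod.Lex.right
    simp
  · apply Prod.Lex.left
    have h1 := (his i List.mem_cons_self).1
    have h2 := (his i List.mem_cons_self).2
    omega
  · apply Prod.Lex.right
    simp
  · apply Prod.Lex.right
    simp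
end

def solve (nums : List Int) (father : Int) (idx : Int) (n : Int) : Bool :=
  let p := nums.foldl (fun (st : Bool × List Int) num =>
      if num < 0 then (st.1, num :: st.2)
      else match st.2 with
        | top :: rest => if num = -1 * top then (st.1, rest) else (false, st.2)
        | [] => (false, st.2)) (true, ([] : List Int))
  if p.2 ≠ [] then false
  else if p.1 then auxA nums father idx n
  else p.1

-- ===== PORT B =====
-- pass 1 of Source B: every close token must match the innermost open doll (early exit)
def balPhase : List Int → List Int → Bool
  | [], opens => opens.isEmpty
  | t :: r, opens =>
    if t < 0 then balPhase r (-t :: opens)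
    else
      match opens with
      | u :: rest => if u = t then balPhase r rest else false
      | [] => false

-- win.index(v, p+1) together with the slice win[p+1:q] of Source B's segment:
-- split at the first occurrence of v (none = ValueError)
def splitFirst (v : Int) (r : List Int) : Option (List Int × List Int) :=
  match r with
  | [] => none
  | t :: r' => if t = v then some ([], r') else (splitFirst v r').map (fun p => (t :: p.1, p.2))

-- length fact cited by the termination proofs of seg and runTodo below
theorem splitFirst_len (v : Int) : ∀ (r M rest : List Int),
    splitFirst v r = some (M, rest) → M.length + 1 + rest.length = r.length := by
  intro r
  induction r with
  | nil => intro M rest h; simp [splitFirst] at h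
  | cons t r' ih =>
    intro M rest h
    by_cases ht : t = v
    · subst ht
      simp [splitFirst] at h
      obtain ⟨h1, h2⟩ := h
      subst h1; subst h2
      simp
      omega
    · rw [splitFirst] at h
      simp only [if_neg ht, Option.map_eq_some_iff] at h
      obtain ⟨⟨M', rest'⟩, hsp, hpair⟩ := h
      have hM : M = t :: M' := by simpa using congrArg Prod.fst hpair.symm
      have hr : rest = rest' := by simpa using congrArg Prod.snd hpair.symm
      have hlen := ih M' rest' hsp
      subst hM
      subst hr
      simp only [List.length_cons]
      omega

-- the inner while loop of Source B's segment: the window's toplevel (child, size) pairs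
-- and their size total; none when some open doll is never closed
def seg : List Int → Option (List (List Int × Int) × Int)
  | [] => some ([], 0)
  | t :: r =>
    if t < 0 then
      match h : splitFirst (-t) r with
      | none => none
      | some (M, rest) => (seg rest).map (fun p => ((M, -t) :: p.1, p.2 + -t))
    else seg r
termination_by l => l.length
decreasing_by
  · have := splitFirst_len (-t) r M rest h
    simp
    omega
  · simp

-- size fact cited by runTodo's termination proof below
theorem seg_size : ∀ (k : Nat) (w : List Int) (ch : List (List Int × Int)) (tot : Int),
    w.length ≤ k → seg w = some (ch, tot) →
    ((ch.map (fun p => p.1.length + 1)).sum) ≤ w.length := by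
  intro k
  induction k with
  | zero =>
    intro w ch tot hk h
    have hw : w = [] := by cases w with | nil => rfl | cons a b => simp at hk
    subst hw
    rw [seg] at h
    simp at h
    simp [h.1]
  | succ k ih =>
    intro w ch tot hk h
    cases w with
    | nil =>
      rw [seg] at h
      simp at h
      simp [h.1]
    | cons t r =>
      rw [seg] at h
      by_cases ht : t < 0
      · rw [if_pos ht] at h
        cases hsp : splitFirst (-t) r with
        | none => rw [hsp] at h; simp at h
        | some p =>
          obtain ⟨M, rest⟩ := p
          rw [hsp] at h
          simp only [Option.map_eq_some_iff] at h
          obtain ⟨⟨ch', tot'⟩, hseg, hpair⟩ := h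
          have hch : ch = (M, -t) :: ch' := by simpa using congrArg Prod.fst hpair.symm
          have hlen := splitFirst_len (-t) r M rest hsp
          have hrec := ih rest ch' tot' (by simp at hk; omega) hseg
          subst hch
          simp only [List.map_cons, List.sum_cons, List.length_cons]
          omega
      · rw [if_neg ht] at h
        have hrec := ih r ch tot (by simp at hk; omega) h
        simp only [List.length_cons]
        omega

-- the worklist loop of Source B's solve (head of the list = top of the Python stack)
def runTodo : List (List Int × Int) → Bool
  | [] => true
  | (win, cap) :: rest =>
    if win.isEmpty then runTodo rest
    else if win.length = 2 then
      if -(win.headD 0) < cap then runTodo rest else false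
    else
      match hs : seg win with
      | none => false
      | some (ch, tot) =>
        if 0 < tot ∧ tot < cap then runTodo (ch.reverse ++ rest) else false
termination_by l => (l.map (fun p => p.1.length + 1)).sum
decreasing_by
  · simp
  · simp
  · have := seg_size win.length win ch tot (le_refl _) hs
    simp only [List.map_append, List.sum_append, List.map_reverse, List.sum_reverse,
      List.map_cons, List.sum_cons]
    omega

def solve_alt (nums : List Int) (father : Int) (idx : Int) (n : Int) : Bool :=
  if balPhase nums [] then
    runTodo [(PySem.List.slice nums (some idx) (some n), father)]
  else false

-- ===== PRECONDITION & SPEC =====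
-- the standard declarative matched-bracket predicate: every close token equals minus the
-- innermost open token (bracket-matchedness has no non-recursive formula; this is the
-- textbook definition, written independently of both ports' loops)
def balCheck (w : List Int) (st : List Int) : Bool :=
  match w with
  | [] => st.isEmpty
  | t :: r =>
    if t < 0 then balCheck r (t :: st)
    else match st with
      | u :: st' => decide (t = -u) && balCheck r st'
      | [] => false

-- Pre_ excludes only balanced inputs whose window bounds lie outside 0 ≤ idx ≤ n ≤ len(nums):
-- there A either raises IndexError or returns values produced by Python negative-index
-- wraparound / empty-range conventions, a corner where A's and B's (slice-based) readings
-- are both accidental and equally defensible.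
def Pre_solve (nums : List Int) (father : Int) (idx : Int) (n : Int) : Prop :=
  balCheck nums [] = false ∨ (0 ≤ idx ∧ idx ≤ n ∧ n ≤ (nums.length : Int))
instance (nums : List Int) (father : Int) (idx : Int) (n : Int) : Decidable (Pre_solve nums father idx n) := by unfold Pre_solve; infer_instance

def pvWitness_solve : List Int × Int × Int × Int := ([-3, -1, 1, 3], 10, 0, 4)

def Spec_solve (nums : List Int) (father : Int) (idx : Int) (n : Int) (out : Bool) : Prop := out = solve_alt nums father idx n
instance (nums : List Int) (father : Int) (idx : Int) (n : Int) (out : Bool) : Decidable (Spec_solve nums father idx n out) := by unfold Spec_solve; infer_instance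

-- ===== CLAIM (what is proved, stated in full; the proofs are below) =====
def Claim_equal_solve : Prop := ∀ (nums : List Int) (father : Int) (idx : Int) (n : Int), Dom_solve nums father idx n → Pre_solve nums father idx n → Spec_solve nums father idx n (solve nums father idx n)

-- ===== LEMMAS AND PROOFS =====

-- window nums[a:b] (shorthand used only by the proofs)
def W (nums : List Int) (a b : Int) : List Int := PySem.List.slice nums (some a) (some b)

-- a single-window run of the worklist
def validW (w : List Int) (c : Int) : Bool := runTodo [(w, c)]

theorem splitFirst_none_iff (v : Int) (r : List Int) : splitFirst v r = none ↔ v ∉ r := by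
  induction r with
  | nil => simp [splitFirst]
  | cons t r' ih =>
    by_cases h : t = v
    · subst h; simp [splitFirst]
    · simp [splitFirst, h, Option.map_eq_none_iff, ih, Ne.symm h]

theorem splitFirst_some (v : Int) (r : List Int) (M rest : List Int)
    (h : splitFirst v r = some (M, rest)) : r = M ++ v :: rest ∧ v ∉ M := by
  induction r generalizing M rest with
  | nil => simp [splitFirst] at h
  | cons t r' ih =>
    by_cases ht : t = v
    · subst ht
      simp [splitFirst] at h
      obtain ⟨h1, h2⟩ := h
      subst h1; subst h2; simp
    · rw [splitFirst] at h
      simp only [if_neg ht, Option.map_eq_some_iff] at h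
      obtain ⟨⟨M', rest'⟩, hsp, hpair⟩ := h
      obtain ⟨he, hnotin⟩ := ih M' rest' hsp
      have hM : M = t :: M' := by simpa using congrArg Prod.fst hpair.symm
      have hr : rest = rest' := by simpa using congrArg Prod.snd hpair.symm
      subst hM; subst hr; subst he
      simp [hnotin, Ne.symm ht]

-- ---- slice (window) facts ----
theorem W_nil (nums : List Int) (a b : Int) (h0 : 0 ≤ a) (h1 : 0 ≤ b) (h : b ≤ a) :
    W nums a b = [] := by
  rw [W, PySem.List.slice_toNat nums h0 h1]
  have hz : b.toNat - a.toNat = 0 := by omega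
  simp [hz]

theorem W_cons (nums : List Int) (a b : Int) (h0 : 0 ≤ a) (h1 : a < b)
    (h2 : b ≤ (nums.length : Int)) :
    W nums a b = pyGetZ nums a :: W nums (a + 1) b := by
  have hb : (0 : Int) ≤ b := by omega
  have ha' : a.toNat < nums.length := by omega
  rw [W, W, PySem.List.slice_toNat nums h0 hb, PySem.List.slice_toNat nums (by omega : (0:Int) ≤ a + 1) hb]
  rw [List.drop_eq_getElem_cons ha']
  have hsucc : b.toNat - a.toNat = (b.toNat - (a + 1).toNat) + 1 := by omega
  rw [hsucc, List.take_succ_cons]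
  have hg : pyGetZ nums a = nums[a.toNat] := by
    rw [pyGetZ, PySem.List.pyGet?_eq_some_getElem nums h0 (by omega)]
    rfl
  rw [hg]
  have hd : a.toNat + 1 = (a + 1).toNat := by omega
  rw [hd]

theorem W_len (nums : List Int) (a b : Int) (h0 : 0 ≤ a) (h1 : a ≤ b) (h2 : b ≤ (nums.length : Int)) :
    (W nums a b).length = (b - a).toNat := by
  rw [W, PySem.List.slice_toNat nums h0 (by omega)]
  simp only [List.length_take, List.length_drop]
  omega

theorem W_take (nums : List Int) (a b c : Int) (h0 : 0 ≤ a) (h1 : a ≤ b) (h2 : b ≤ c) :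
    W nums a b = (W nums a c).take (b - a).toNat := by
  rw [W, W, PySem.List.slice_toNat nums h0 (by omega), PySem.List.slice_toNat nums h0 (by omega)]
  rw [List.take_take]
  congr 1
  omega

theorem W_drop (nums : List Int) (a c : Int) (k : Nat) (h0 : 0 ≤ a) (hc : 0 ≤ c) :
    (W nums a c).drop k = W nums (a + (k : Int)) c := by
  rw [W, W, PySem.List.slice_toNat nums h0 hc, PySem.List.slice_toNat nums (by omega : (0:Int) ≤ a + (k:Int)) hc]
  rw [List.drop_take, List.drop_drop]
  have h1 : a.toNat + k = (a + (k : Int)).toNat := by omega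
  have h2 : c.toNat - a.toNat - k = c.toNat - (a + (k : Int)).toNat := by omega
  rw [h1, h2]

-- ---- unfolding lemmas for seg and runTodo ----
theorem seg_nil : seg [] = some ([], 0) := by
  rw [seg]

theorem seg_cons (t : Int) (r : List Int) :
    seg (t :: r) =
      if t < 0 then
        (match splitFirst (-t) r with
         | none => none
         | some (M, rest) => (seg rest).map (fun p => ((M, -t) :: p.1, p.2 + -t)))
      else seg r := by
  rw [seg]
  by_cases ht : t < 0
  · rw [if_pos ht, if_pos ht]
    cases splitFirst (-t) r <;> rfl
  · rw [if_neg ht, if_neg ht]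

theorem runTodo_nil : runTodo [] = true := by
  rw [runTodo]

theorem runTodo_cons (win : List Int) (cap : Int) (rest : List (List Int × Int)) :
    runTodo ((win, cap) :: rest) =
      if win.isEmpty then runTodo rest
      else if win.length = 2 then
        if -(win.headD 0) < cap then runTodo rest else false
      else
        (match seg win with
         | none => false
         | some (ch, tot) =>
           if 0 < tot ∧ tot < cap then runTodo (ch.reverse ++ rest) else false) := by
  rw [runTodo]
  by_cases h0 : win.isEmpty
  · simp [h0]
  · rw [if_neg h0, if_neg h0]
    by_cases h2 : win.length = 2
    · simp [h2]
    · rw [if_neg h2, if_neg h2]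
      cases seg win <;> rfl

-- ---- worklist facts ----
def msr (l : List (List Int × Int)) : Nat := (l.map (fun p => p.1.length + 1)).sum

theorem runTodo_append : ∀ (k : Nat) (a b : List (List Int × Int)), msr a ≤ k →
    runTodo (a ++ b) = (runTodo a && runTodo b) := by
  intro k
  induction k with
  | zero =>
    intro a b hk
    have ha : a = [] := by
      cases a with
      | nil => rfl
      | cons p r => simp [msr] at hk
    subst ha
    simp [runTodo_nil]
  | succ k ih =>
    intro a b hk
    cases a with
    | nil => simp [runTodo_nil]
    | cons p r =>
      obtain ⟨win, cap⟩ := p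
      have hmr : msr r ≤ k := by simp [msr] at hk ⊢; omega
      rw [List.cons_append, runTodo_cons, runTodo_cons]
      by_cases h0 : win.isEmpty
      · rw [if_pos h0, if_pos h0, ih r b hmr]
      · rw [if_neg h0, if_neg h0]
        by_cases h2 : win.length = 2
        · rw [if_pos h2, if_pos h2]
          by_cases hc : -(win.headD 0) < cap
          · rw [if_pos hc, if_pos hc, ih r b hmr]
          · rw [if_neg hc, if_neg hc]
            simp
        · rw [if_neg h2, if_neg h2]
          cases hs : seg win with
          | none => simp
          | some q =>
            obtain ⟨ch, tot⟩ := q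
            dsimp only
            by_cases hc : 0 < tot ∧ tot < cap
            · rw [if_pos hc, if_pos hc]
              have hchsz := seg_size win.length win ch tot (le_refl _) hs
              have hm : msr (ch.reverse ++ r) ≤ k := by
                simp only [msr, List.map_append, List.sum_append, List.map_reverse,
                  List.sum_reverse, List.map_cons, List.sum_cons] at hk ⊢
                omega
              rw [← List.append_assoc, ih (ch.reverse ++ r) b hm]
            · rw [if_neg hc, if_neg hc]
              simp
  
theorem runTodo_all : ∀ (l : List (List Int × Int)),
    runTodo l = l.all (fun p => validW p.1 p.2) := by
  intro l
  induction l with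
  | nil => simp [runTodo_nil]
  | cons p r ih =>
    obtain ⟨w, c⟩ := p
    have h1 : runTodo ((w, c) :: r) = runTodo ([(w, c)] ++ r) := by simp
    rw [h1, runTodo_append (msr [(w, c)]) [(w, c)] r (le_refl _), ih]
    rfl

-- ---- unfolding lemmas for the WF-recursive loop of A ----
theorem auxLoop_congr_is (nums : List Int) (father idx n : Int) (is1 is2 : List Int)
    (h : is1 = is2) (H1 : ∀ x ∈ is1, idx ≤ x ∧ x < n) (H2 : ∀ x ∈ is2, idx ≤ x ∧ x < n)
    (ans : Bool) (s ov j : Int) (hj : idx ≤ j) :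
    auxLoop nums father idx n is1 H1 ans s ov j hj
      = auxLoop nums father idx n is2 H2 ans s ov j hj := by
  subst h
  rfl

theorem auxLoop_nil (nums : List Int) (father idx n : Int)
    (his : ∀ x ∈ ([] : List Int), idx ≤ x ∧ x < n) (ans : Bool) (s ov j : Int)
    (hj : idx ≤ j) :
    auxLoop nums father idx n [] his ans s ov j hj
      = (decide (s < father) && ans && !(decide (j = idx)) && decide (ov = -1)) := by
  rw [auxLoop.eq_def]

theorem auxLoop_cons (nums : List Int) (father idx n i : Int) (is' : List Int)
    (his : ∀ x ∈ i :: is', idx ≤ x ∧ x < n) (ans : Bool) (s ov j : Int) (hj : idx ≤ j) :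
    auxLoop nums father idx n (i :: is') his ans s ov j hj
      = (if pyGetZ nums i < 0 ∧ ov = -1 then
          auxLoop nums father idx n is' (fun x hx => his x (List.mem_cons_of_mem _ hx))
            ans s (-1 * pyGetZ nums i) i (his i List.mem_cons_self).1
        else if pyGetZ nums i = ov then
          auxLoop nums father idx n is' (fun x hx => his x (List.mem_cons_of_mem _ hx))
            (ans && auxA nums ov (j + 1) i) (s + pyGetZ nums i) (-1) i
            (his i List.mem_cons_self).1
        else
          auxLoop nums father idx n is' (fun x hx => his x (List.mem_cons_of_mem _ hx))
            ans s ov j hj) := by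
  rw [auxLoop.eq_def]

-- ---- A-side fast-forward of the pending scan ----
theorem PL_none (nums : List Int) (fa idx n : Int) (h0 : 0 ≤ idx)
    (hlen : n ≤ (nums.length : Int)) :
    ∀ (k : Nat) (i v jopen : Int) (ans : Bool) (s : Int), (n - i).toNat ≤ k →
    idx ≤ jopen → jopen < i → 0 < v → v ∉ W nums i n →
    ∀ H hj, auxLoop nums fa idx n (PySem.List.pyRange i n 1) H ans s v jopen hj = false := by
  intro k
  induction k with
  | zero =>
    intro i v jopen ans s hk hj1 hj2 hv hnotin H hj
    have hge : n ≤ i := by omega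
    rw [auxLoop_congr_is nums fa idx n _ [] (PySem.List.pyRange_one_eq_nil hge) H (by simp)
      ans s v jopen hj, auxLoop_nil]
    have hne : v ≠ -1 := by omega
    simp [hne]
  | succ k ihk =>
    intro i v jopen ans s hk hj1 hj2 hv hnotin H hj
    by_cases hin : i < n
    · have hiz : (0 : Int) ≤ i := by omega
      have hcons := W_cons nums i n hiz hin hlen
      have htv : pyGetZ nums i ≠ v := by
        intro he
        apply hnotin
        rw [hcons, he]
        exact List.mem_cons_self
      have hnotin' : v ∉ W nums (i + 1) n := by
        intro hm
        exact hnotin (by rw [hcons]; exact List.mem_cons_of_mem _ hm)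
      have hrc := PySem.List.pyRange_one_cons hin
      rw [auxLoop_congr_is nums fa idx n _ _ hrc H
        (fun x hx => H x (by rw [hrc]; exact hx)) ans s v jopen hj, auxLoop_cons]
      rw [if_neg (by
        rintro ⟨-, hv1⟩
        omega)]
      rw [if_neg htv]
      exact ihk (i + 1) v jopen ans s (by omega) hj1 (by omega) hv hnotin' _ hj
    · have hge : n ≤ i := by omega
      rw [auxLoop_congr_is nums fa idx n _ [] (PySem.List.pyRange_one_eq_nil hge) H (by simp)
        ans s v jopen hj, auxLoop_nil]
      have hne : v ≠ -1 := by omega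
      simp [hne]

theorem PL_some (nums : List Int) (fa idx n : Int) (h0 : 0 ≤ idx)
    (hlen : n ≤ (nums.length : Int)) :
    ∀ (k : Nat) (i v jopen : Int) (ans : Bool) (s : Int) (M rest : List Int), (n - i).toNat ≤ k →
    idx ≤ jopen → jopen < i → i ≤ n → 0 < v →
    splitFirst v (W nums i n) = some (M, rest) →
    ∀ (p : Int), p = i + (M.length : Int) →
    ∀ H hj H2 hj2,
      auxLoop nums fa idx n (PySem.List.pyRange i n 1) H ans s v jopen hj
        = auxLoop nums fa idx n (PySem.List.pyRange (p + 1) n 1) H2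
            (ans && auxA nums v (jopen + 1) p) (s + v) (-1) p hj2 := by
  intro k
  induction k with
  | zero =>
    intro i v jopen ans s M rest hk hj1 hj2 hile hv hsp p hp H hj H2 hj2'
    have hge : n ≤ i := by omega
    rw [W_nil nums i n (by omega) (by omega) hge] at hsp
    rw [splitFirst] at hsp
    exact absurd hsp (by simp)
  | succ k ihk =>
    intro i v jopen ans s M rest hk hj1 hj2 hile hv hsp p hp H hj H2 hj2'
    by_cases hin : i < n
    · have hiz : (0 : Int) ≤ i := by omega
      have hcons := W_cons nums i n hiz hin hlen
      rw [hcons, splitFirst] at hsp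
      have hrc := PySem.List.pyRange_one_cons hin
      rw [auxLoop_congr_is nums fa idx n _ _ hrc H
        (fun x hx => H x (by rw [hrc]; exact hx)) ans s v jopen hj, auxLoop_cons]
      by_cases htv : pyGetZ nums i = v
      · rw [if_pos htv] at hsp
        have hM : M = [] ∧ rest = W nums (i + 1) n := by
          constructor
          · simpa using congrArg (fun o => (Option.map Prod.fst o).getD [0]) hsp
          · simpa using (congrArg (fun o => (Option.map Prod.snd o).getD []) hsp).symm
        obtain ⟨rfl, -⟩ := hM
        have hpi : p = i := by simpa using hp
        subst hpi
        rw [if_neg (by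
          rintro ⟨hlt, -⟩
          omega)]
        rw [if_pos htv]
        rw [htv]
      · rw [if_neg htv] at hsp
        rw [Option.map_eq_some_iff] at hsp
        obtain ⟨⟨M', rest'⟩, hsp', hpair⟩ := hsp
        have hMM : M = pyGetZ nums i :: M' := by
          simpa using congrArg Prod.fst hpair.symm
        have hrr : rest = rest' := by
          simpa using congrArg Prod.snd hpair.symm
        have hne1 : ¬(pyGetZ nums i < 0 ∧ v = -1) := by
          rintro ⟨-, hv1⟩
          omega
        rw [if_neg hne1, if_neg htv]
        refine ihk (i + 1) v jopen ans s M' rest' (by omega) hj1 (by omega) ?_ hv hsp' p ?_ _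
          (by omega) H2 hj2'
        · omega
        · rw [hp, hMM]
          simp only [List.length_cons]
          push_cast
          ring
    · have hge : n ≤ i := by omega
      rw [W_nil nums i n (by omega) (by omega) hge] at hsp
      rw [splitFirst] at hsp
      exact absurd hsp (by simp)

-- ---- the clean-state loop correspondence ----
theorem LOOP (nums : List Int) (fa idx n : Int) (h0 : 0 ≤ idx)
    (hlen : n ≤ (nums.length : Int))
    (IH : ∀ (fa' a b : Int), (b - a).toNat < (n - idx).toNat → 0 ≤ a → a ≤ b →
      b ≤ (nums.length : Int) → auxA nums fa' a b = validW (W nums a b) fa') :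
    ∀ (k : Nat) (i : Int), (n - i).toNat ≤ k → idx ≤ i → i ≤ n →
    ∀ (ans : Bool) (s j : Int), 0 ≤ s → (!decide (j = idx)) = decide (0 < s) →
    ∀ H hj,
      auxLoop nums fa idx n (PySem.List.pyRange i n 1) H ans s (-1) j hj
        = (match seg (W nums i n) with
           | none => false
           | some (ch, tot) =>
             decide (s + tot < fa) && ans && (ch.all fun p => validW p.1 p.2)
               && decide (0 < s + tot)) := by
  intro k
  induction k with
  | zero =>
    intro i hk hi1 hi2 ans s j hs hm H hj
    have hge : n ≤ i := by omega
    have hnil : W nums i n = [] := W_nil nums i n (by omega) (by omega) hge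
    rw [auxLoop_congr_is nums fa idx n _ [] (PySem.List.pyRange_one_eq_nil hge) H (by simp)
      ans s (-1) j hj, auxLoop_nil, hnil, seg_nil, hm]
    simp
  | succ k ihk =>
    intro i hk hi1 hi2 ans s j hs hm H hj
    by_cases hin : i < n
    · have hiz : (0 : Int) ≤ i := by omega
      have hcons := W_cons nums i n hiz hin hlen
      have hrc := PySem.List.pyRange_one_cons hin
      rw [auxLoop_congr_is nums fa idx n _ _ hrc H
        (fun x hx => H x (by rw [hrc]; exact hx)) ans s (-1) j hj, auxLoop_cons]
      by_cases ht : pyGetZ nums i < 0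
      · -- OPEN: A sets openVal := -nums[i]; B's segment searches the close
        rw [if_pos (⟨ht, rfl⟩ : pyGetZ nums i < 0 ∧ (-1 : Int) = -1)]
        rw [neg_one_mul]
        rw [hcons, seg_cons]
        rw [if_pos ht]
        cases hsp : splitFirst (-pyGetZ nums i) (W nums (i + 1) n) with
        | none =>
          have hnotin := (splitFirst_none_iff _ _).mp hsp
          rw [PL_none nums fa idx n h0 hlen k (i + 1) (-pyGetZ nums i) i ans s
            (by omega) hi1 (by omega) (by omega) hnotin]
        | some pr =>
          obtain ⟨M, rest⟩ := pr
          obtain ⟨hWdec, hMnot⟩ := splitFirst_some _ _ _ _ hsp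
          have hwl : (W nums (i + 1) n).length = (n - (i + 1)).toNat :=
            W_len nums (i + 1) n (by omega) (by omega) hlen
          have hlen1 : M.length + 1 + rest.length = (n - (i + 1)).toNat := by
            rw [← hwl, hWdec]
            simp
            omega
          set p : Int := i + 1 + (M.length : Int) with hp
          have hpn : p < n := by omega
          have H2' : ∀ x ∈ PySem.List.pyRange (p + 1) n 1, idx ≤ x ∧ x < n := by
            intro x hx
            have hx' := PySem.List.mem_pyRange_one.mp hx
            exact ⟨by omega, hx'.2⟩
          have hj2' : idx ≤ p := by omega
          rw [PL_some nums fa idx n h0 hlen k (i + 1) (-pyGetZ nums i) i ans s M rest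
            (by omega) hi1 (by omega) (by omega) (by omega) hsp p hp _ (by omega) H2' hj2']
          have hWp : W nums (i + 1) p = M := by
            rw [W_take nums (i + 1) p n (by omega) (by omega) (by omega), hWdec]
            have hlm : (p - (i + 1)).toNat = M.length := by omega
            rw [hlm, List.take_left]
          have hrest : rest = W nums (p + 1) n := by
            have hd := W_drop nums (i + 1) n (M.length + 1) (by omega) (by omega)
            rw [hWdec] at hd
            have he : (M ++ -pyGetZ nums i :: rest).drop (M.length + 1) = rest := by
              rw [show M ++ -pyGetZ nums i :: rest = (M ++ [-pyGetZ nums i]) ++ rest by simp]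
              rw [show M.length + 1 = (M ++ [-pyGetZ nums i]).length by simp]
              exact List.drop_left
            rw [he] at hd
            rw [hd]
            congr 1
            push_cast
            ring
          have hchild : auxA nums (-pyGetZ nums i) (i + 1) p = validW M (-pyGetZ nums i) := by
            rw [IH (-pyGetZ nums i) (i + 1) p (by omega) (by omega) (by omega) (by omega), hWp]
          rw [ihk (p + 1) (by omega) (by omega) (by omega)
            (ans && auxA nums (-pyGetZ nums i) (i + 1) p) (s + -pyGetZ nums i) p
            (by omega)
            (by
              have hpne : p ≠ idx := by omega
              have hpos : (0 : Int) < s + -pyGetZ nums i := by omega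
              simp [hpne, hpos])
            H2' hj2']
          rw [← hrest]
          dsimp only
          cases hseg : seg rest with
          | none => rfl
          | some q =>
            obtain ⟨ch', tot'⟩ := q
            simp only [Option.map_some]
            rw [hchild]
            have harith1 : s + -pyGetZ nums i + tot' = s + (tot' + -pyGetZ nums i) := by ring
            rw [harith1, List.all_cons]
            cases ans <;> cases validW M (-pyGetZ nums i)
              <;> cases (ch'.all fun p => validW p.1 p.2)
              <;> cases decide (s + (tot' + -pyGetZ nums i) < fa)
              <;> cases decide (0 < s + (tot' + -pyGetZ nums i)) <;> simp
      · -- SKIP: token ≥ 0 with no pending open; segment skips it too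
        rw [if_neg (by rintro ⟨hlt, -⟩; exact ht hlt)]
        rw [if_neg (show ¬ pyGetZ nums i = -1 by omega)]
        rw [hcons, seg_cons, if_neg ht]
        exact ihk (i + 1) (by omega) (by omega) (by omega) ans s j hs hm _ hj
    · have hge : n ≤ i := by omega
      have hnil : W nums i n = [] := W_nil nums i n (by omega) (by omega) hge
      rw [auxLoop_congr_is nums fa idx n _ [] (PySem.List.pyRange_one_eq_nil hge) H (by simp)
        ans s (-1) j hj, auxLoop_nil, hnil, seg_nil, hm]
      simp

theorem main_bridge (nums : List Int) (fa idx n : Int) (h0 : 0 ≤ idx) (h1 : idx ≤ n)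
    (h2 : n ≤ (nums.length : Int)) :
    auxA nums fa idx n = validW (PySem.List.slice nums (some idx) (some n)) fa := by
  show auxA nums fa idx n = validW (W nums idx n) fa
  have main : ∀ (k : Nat) (fa' a b : Int), (b - a).toNat ≤ k → 0 ≤ a → a ≤ b →
      b ≤ (nums.length : Int) → auxA nums fa' a b = validW (W nums a b) fa' := by
    intro k
    induction k with
    | zero =>
      intro fa' a b hk ha hab hb
      have hab' : a = b := by omega
      subst hab'
      rw [auxA.eq_def, if_pos rfl]
      rw [W_nil nums a a (by omega) (by omega) le_rfl]
      rw [validW, runTodo_cons]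
      simp [runTodo_nil]
    | succ k ihk =>
      intro fa' a b hk ha hab hb
      rw [auxA.eq_def]
      by_cases he : a = b
      · rw [if_pos he]
        subst he
        rw [W_nil nums a a (by omega) (by omega) le_rfl]
        rw [validW, runTodo_cons]
        simp [runTodo_nil]
      · rw [if_neg he]
        have hab2 : a < b := by omega
        have hlenW : (W nums a b).length = (b - a).toNat := W_len nums a b ha hab hb
        have hne : ¬ (W nums a b).isEmpty := by
          rw [List.isEmpty_iff_length_eq_zero, hlenW]
          omega
        by_cases h2c : b - a = 2
        · rw [if_pos h2c]
          have hcons := W_cons nums a b ha hab2 hb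
          rw [validW, runTodo_cons, if_neg hne, if_pos (by rw [hlenW]; omega)]
          have hhead : (W nums a b).headD 0 = pyGetZ nums a := by rw [hcons]; rfl
          rw [hhead, runTodo_nil, neg_one_mul]
          by_cases hc : -pyGetZ nums a < fa'
          · simp [hc]
          · simp [hc]
        · rw [if_neg h2c]
          rw [LOOP nums fa' a b ha hb
            (fun fa'' a' b' hlt ha' hab' hb' => ihk fa'' a' b' (by omega) ha' hab' hb')
            (k + 1) a hk le_rfl hab true 0 a le_rfl (by simp) _ _]
          rw [validW, runTodo_cons, if_neg hne, if_neg (by rw [hlenW]; omega)]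
          cases hseg : seg (W nums a b) with
          | none => rfl
          | some q =>
            obtain ⟨ch, tot⟩ := q
            dsimp only
            have hrt : runTodo (ch.reverse ++ []) = ch.all fun p => validW p.1 p.2 := by
              rw [List.append_nil, runTodo_all, List.all_reverse]
            by_cases hc : 0 < tot ∧ tot < fa'
            · rw [if_pos hc, hrt]
              have hc1 : decide (0 + tot < fa') = true := by simp; omega
              have hc2 : decide ((0:Int) < 0 + tot) = true := by simp; omega
              rw [hc1, hc2]
              simp
            · rw [if_neg hc]
              have : decide (0 + tot < fa') = false ∨ decide ((0:Int) < 0 + tot) = false := by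
                by_cases hca : 0 < tot
                · left; simp; omega
                · right; simp; omega
              rcases this with hcc | hcc <;> rw [hcc] <;> simp
  exact main ((n - idx).toNat) fa idx n le_rfl h0 h1 h2

-- ---- balance-phase correspondence ----
theorem balCheck_cons (t : Int) (r st : List Int) :
    balCheck (t :: r) st =
      if t < 0 then balCheck r (t :: st)
      else match st with
        | u :: st' => decide (t = -u) && balCheck r st'
        | [] => false := by
  rw [balCheck.eq_def]

theorem balfold (w : List Int) :
    ∀ (ans : Bool) (st : List Int),
      ((w.foldl (fun (st : Bool × List Int) num =>
          if num < 0 then (st.1, num :: st.2)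
          else match st.2 with
            | top :: rest => if num = -1 * top then (st.1, rest) else (false, st.2)
            | [] => (false, st.2)) (ans, st)).1
        && (w.foldl (fun (st : Bool × List Int) num =>
          if num < 0 then (st.1, num :: st.2)
          else match st.2 with
            | top :: rest => if num = -1 * top then (st.1, rest) else (false, st.2)
            | [] => (false, st.2)) (ans, st)).2.isEmpty)
      = (ans && balCheck w st) := by
  induction w with
  | nil => intro ans st; rfl
  | cons t r ih =>
    intro ans st
    rw [List.foldl_cons]
    by_cases ht : t < 0
    · simp only [if_pos ht]
      rw [ih]
      rw [balCheck_cons]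
      rw [if_pos ht]
    · cases st with
      | nil =>
        simp only [if_neg ht]
        rw [ih]
        rw [balCheck_cons]
        rw [if_neg ht]
        simp
      | cons u st' =>
        simp only [if_neg ht]
        by_cases he : t = -1 * u
        · simp only [if_pos he]
          rw [ih]
          rw [balCheck_cons]
          rw [if_neg ht]
          have he' : decide (t = -u) = true := by
            rw [neg_one_mul] at he
            simp [he]
          simp [he']
        · simp only [if_neg he]
          rw [ih]
          rw [balCheck_cons]
          rw [if_neg ht]
          have he' : decide (t = -u) = false := by
            rw [neg_one_mul] at he
            simp [he]
          simp [he']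

theorem balPhase_balCheck : ∀ (r st : List Int),
    balPhase r (st.map (fun u => -u)) = balCheck r st := by
  intro r
  induction r with
  | nil =>
    intro st
    rw [balPhase.eq_def, balCheck.eq_def]
    simp
  | cons t r' ih =>
    intro st
    rw [balPhase.eq_def, balCheck_cons]
    dsimp only
    by_cases ht : t < 0
    · rw [if_pos ht, if_pos ht]
      have : -t :: st.map (fun u => -u) = (t :: st).map (fun u => -u) := by simp
      rw [this, ih]
    · rw [if_neg ht, if_neg ht]
      cases st with
      | nil => rfl
      | cons u st' =>
        simp only [List.map_cons]
        by_cases he : -u = t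
        · rw [if_pos he]
          have he' : decide (t = -u) = true := by simp [← he]
          rw [ih st', he']
          simp
        · rw [if_neg he]
          have he' : decide (t = -u) = false := by
            simp
            omega
          rw [he']
          simp

-- ===== VERDICT (by name: the statement is the Claim_ definition above) =====
theorem solve_spec : Claim_equal_solve := by
  intro nums father idx n hdom hpre
  show solve nums father idx n = solve_alt nums father idx n
  rw [solve, solve_alt]
  set P := nums.foldl (fun (st : Bool × List Int) (num : Int) =>
      if num < 0 then (st.1, num :: st.2)
      else match st.2 with
        | top :: rest => if num = -1 * top then (st.1, rest) else (false, st.2)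
        | [] => (false, st.2)) (true, ([] : List Int)) with hP
  have hkey : (P.1 && P.2.isEmpty) = balCheck nums [] := by
    rw [hP, balfold nums true []]
    simp
  have hbp : balPhase nums [] = balCheck nums [] := by
    have := balPhase_balCheck nums []
    simpa using this
  by_cases hbal : balCheck nums [] = true
  · have h2 : P.2 = [] := by
      have := hkey
      rw [hbal] at this
      have h2' : P.2.isEmpty = true := by
        cases hi : P.2.isEmpty
        · rw [hi] at this; simp at this
        · rfl
      simpa using h2'
    have h1 : P.1 = true := by
      have := hkey
      rw [hbal, h2] at this
      simpa using this
    have hbounds : 0 ≤ idx ∧ idx ≤ n ∧ n ≤ (nums.length : Int) := by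
      rcases hpre with hbad | hb
      · rw [hbal] at hbad
        exact absurd hbad (by simp)
      · exact hb
    rw [if_neg (by simp [h2]), if_pos h1, hbp, if_pos hbal]
    exact main_bridge nums father idx n hbounds.1 hbounds.2.1 hbounds.2.2
  · have hbal' : balCheck nums [] = false := by
      cases hb : balCheck nums []
      · rfl
      · exact absurd hb hbal
    by_cases h2 : P.2 = []
    · have h1 : P.1 = false := by
        have := hkey
        rw [hbal', h2] at this
        simpa using this
      rw [if_neg (by simp [h2]), h1, hbp, hbal']
      simp
    · rw [if_pos (by simp [h2]), hbp, hbal']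
      simp
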